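-- pv_equiv track=rewrite | github.com/Soham0004/Programings | DNA Sequencing.py | find_matching_strings
-- ===== SOURCE A (Python) =====
-- def find_matching_strings(pattern, strings):
--   pattern_dict = {}
--   for i, char in enumerate(pattern):
--     if char != "*":
--       pattern_dict[i] = char
--   matching_strings = []
--   for string in strings:
--     if all(string[i] == pattern_dict.get(i, string[i]) for i in range(len(string))):
--       matching_strings.append(string)
--   return matching_strings
-- ===== SOURCE B (Python) =====
-- def find_matching_strings(pattern, strings):
--   # Pattern-major: one stable filtering pass over the surviving candidates per
--   # fixed (non-'*') pattern character.  Pattern positions at or beyond the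
--   # longest string constrain nothing, so the loop stops there.
--   candidates = list(strings)
--   limit = max(map(len, strings), default=0)
--   for i, p in enumerate(pattern[:limit]):
--     if p != "*":
--       candidates = [s for s in candidates if i >= len(s) or s[i] == p]
--   return candidates
-- ===== Notes on version B (the rewrite author's own statement) =====
-- stated objective: alternative
-- what changed: Inverts the loop nesting: instead of A's string-major scan (dict of fixed positions, then per-string check of every index), B is pattern-major - for each non-'*' pattern position up to the longest string's length it runs one stable filtering pass over the surviving candidate strings; no dict and no per-string index scan exist.
import Mathlib
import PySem

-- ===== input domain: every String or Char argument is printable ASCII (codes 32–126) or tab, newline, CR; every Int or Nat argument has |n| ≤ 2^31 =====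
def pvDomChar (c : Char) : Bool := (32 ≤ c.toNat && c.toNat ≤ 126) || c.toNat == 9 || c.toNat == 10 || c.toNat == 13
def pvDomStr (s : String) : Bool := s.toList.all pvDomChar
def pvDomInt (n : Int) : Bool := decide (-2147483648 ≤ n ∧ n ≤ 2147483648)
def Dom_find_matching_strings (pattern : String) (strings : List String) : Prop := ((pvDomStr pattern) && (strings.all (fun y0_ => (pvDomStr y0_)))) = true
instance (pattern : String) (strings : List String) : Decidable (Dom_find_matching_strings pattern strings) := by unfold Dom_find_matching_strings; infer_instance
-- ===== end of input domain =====

-- B inverts the loop nesting: pattern-major (one stable filtering pass over the candidate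
-- strings per non-'*' pattern position) instead of A's string-major per-index scan with a
-- precomputed position dict; objective: alternative.

-- ===== PORT A =====
-- string[i] for i in range(len(string)) is always in range, so pyGetD with a dummy default is
-- exact there (Python never raises on these accesses).
def find_matching_strings (pattern : String) (strings : List String) : List String :=
  let pattern_dict : PySem.Dict Int Char :=
    (PySem.List.enumerate pattern.toList 0).foldl
      (fun d ic => if ic.2 ≠ '*' then d.insert ic.1 ic.2 else d) PySem.Dict.empty
  strings.foldl
    (fun matching_strings s =>
      if (PySem.List.pyRange 0 (PySem.Str.len s) 1).all
           (fun i => PySem.List.pyGetD s.toList i ' '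
                       == pattern_dict.getD i (PySem.List.pyGetD s.toList i ' '))
      then matching_strings ++ [s] else matching_strings) []

-- ===== PORT B =====
-- s[i] is guarded by 'i >= len(s) or', so pyGetD with a dummy default is exact;
-- max(map(len, strings), default=0) is ported as the corresponding foldl max from 0.
def find_matching_strings_alt (pattern : String) (strings : List String) : List String :=
  let limit := strings.foldl (fun m s => max m (PySem.Str.len s)) 0
  (PySem.List.enumerate (PySem.List.slice pattern.toList none (some limit)) 0).foldl
    (fun candidates ip =>
      if ip.2 != '*' then
        candidates.filter
          (fun s => decide (PySem.Str.len s ≤ ip.1)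
                      || (PySem.List.pyGetD s.toList ip.1 ' ' == ip.2))
      else candidates)
    strings

-- ===== PRECONDITION & SPEC =====
def Spec_find_matching_strings (pattern : String) (strings : List String) (out : List String) : Prop := out = find_matching_strings_alt pattern strings
instance (pattern : String) (strings : List String) (out : List String) : Decidable (Spec_find_matching_strings pattern strings out) := by unfold Spec_find_matching_strings; infer_instance

-- ===== CLAIM (what is proved, stated in full; the proofs are below) =====
def Claim_equal_find_matching_strings : Prop := ∀ (pattern : String) (strings : List String), Dom_find_matching_strings pattern strings → Spec_find_matching_strings pattern strings (find_matching_strings pattern strings)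

-- ===== LEMMAS AND PROOFS =====

-- A's dict-building loop, characterised: lookup of j returns the pattern char at position j
-- (if that position exists and is not '*'), else falls through to the initial dict.
lemma dictFold_get? (cs : List Char) (s j : Int) (d0 : PySem.Dict Int Char) :
    ((PySem.List.enumerate cs s).foldl
        (fun d ic => if ic.2 ≠ '*' then d.insert ic.1 ic.2 else d) d0).get? j =
      if s ≤ j ∧ (j - s).toNat < cs.length ∧ cs.getD (j - s).toNat ' ' ≠ '*'
      then some (cs.getD (j - s).toNat ' ')
      else d0.get? j := by
  induction cs generalizing s d0 with
  | nil => simp [PySem.List.enumerate]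
  | cons c cs ih =>
    rw [PySem.List.enumerate_cons, List.foldl_cons, ih]
    by_cases hj : j = s
    · subst hj
      have h0 : (j - j).toNat = 0 := by omega
      simp only [h0, List.getD_cons_zero]
      by_cases hle : j + 1 ≤ j
      · omega
      · simp only [if_neg (by omega : ¬ (j + 1 ≤ j ∧ (j - (j+1)).toNat < cs.length ∧ cs.getD (j - (j+1)).toNat ' ' ≠ '*'))]
        by_cases hc : c = '*'
        · simp [hc]
        · simp [hc, List.length_cons]
    · by_cases hreg : s + 1 ≤ j ∧ (j - (s+1)).toNat < cs.length ∧ cs.getD (j - (s+1)).toNat ' ' ≠ '*'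
      · have hk : (j - s).toNat = (j - (s+1)).toNat + 1 := by omega
        rw [if_pos hreg, if_pos (by
          refine ⟨by omega, ?_, ?_⟩
          · simp only [hk, List.length_cons]; omega
          · simpa only [hk, List.getD_cons_succ] using hreg.2.2)]
        simp only [hk, List.getD_cons_succ]
      · have hfall : ¬ (s ≤ j ∧ (j - s).toNat < (c :: cs).length ∧ (c :: cs).getD (j - s).toNat ' ' ≠ '*') := by
          intro ⟨h1, h2, h3⟩
          have hk : (j - s).toNat = (j - (s+1)).toNat + 1 := by omega
          exact hreg ⟨by omega, by simp only [List.length_cons] at h2; omega,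
            by simpa only [hk, List.getD_cons_succ] using h3⟩
        rw [if_neg hreg, if_neg hfall]
        by_cases hc : c = '*'
        · simp [hc]
        · simp [hc, PySem.Dict.get?_insert, hj]

-- The canonical match predicate both per-string tests reduce to.
def fmsMatch (p s : String) : Prop :=
  ∀ k (h1 : k < p.toList.length) (h2 : k < s.toList.length),
    p.toList[k] = '*' ∨ p.toList[k] = s.toList[k]

-- A's per-string test decides fmsMatch.
lemma checkA_iff (p s : String) :
    ((PySem.List.pyRange 0 (PySem.Str.len s) 1).all
       (fun i => PySem.List.pyGetD s.toList i ' '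
                   == ((PySem.List.enumerate p.toList 0).foldl
                         (fun d ic => if ic.2 ≠ '*' then d.insert ic.1 ic.2 else d)
                         PySem.Dict.empty).getD i (PySem.List.pyGetD s.toList i ' ')) = true)
    ↔ fmsMatch p s := by
  simp only [List.all_eq_true, PySem.List.mem_pyRange_one, PySem.Str.len_eq]
  constructor
  · intro h k hkp hks
    have := h (k : Int) ⟨by omega, by exact_mod_cast hks⟩
    rw [PySem.List.pyGetD_eq_getElem s.toList ' ' (by omega) (by exact_mod_cast hks),
        PySem.Dict.getD_eq_get?_getD, dictFold_get?] at this
    simp only [Int.toNat_natCast, Int.sub_zero] at this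
    by_cases hc : p.toList.getD k ' ' = '*'
    · left; rw [← List.getD_eq_getElem _ _ hkp]; exact hc
    · rw [if_pos ⟨by omega, hkp, hc⟩] at this
      simp only [Option.getD_some, beq_iff_eq] at this
      right
      rw [← List.getD_eq_getElem _ _ hkp]
      exact this.symm
  · intro h i ⟨hi0, hin⟩
    have hks : i.toNat < s.toList.length := by omega
    rw [PySem.List.pyGetD_eq_getElem s.toList ' ' hi0 (by exact_mod_cast hin),
        PySem.Dict.getD_eq_get?_getD, dictFold_get?]
    simp only [Int.sub_zero]
    by_cases hc : 0 ≤ i ∧ i.toNat < p.toList.length ∧ p.toList.getD i.toNat ' ' ≠ '*'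
    · rw [if_pos hc]
      have hkp := hc.2.1
      rcases h i.toNat hkp hks with h1 | h1
      · exact absurd (by rw [List.getD_eq_getElem _ _ hkp]; exact h1) hc.2.2
      · simp only [Option.getD_some, beq_iff_eq, List.getD_eq_getElem _ _ hkp]
        exact h1.symm
    · rw [if_neg hc]
      simp

-- B's per-string test over the truncated pattern decides fmsMatch, once the cut-off m
-- is at least the string's length (positions ≥ m constrain nothing on such a string).
lemma checkB_iff (p s : String) (m : Nat) (hm : s.toList.length ≤ m) :
    ((PySem.List.enumerate (p.toList.take m) 0).all
       (fun ip => !(ip.2 != '*')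
                    || (decide (PySem.Str.len s ≤ ip.1)
                          || (PySem.List.pyGetD s.toList ip.1 ' ' == ip.2))) = true)
    ↔ fmsMatch p s := by
  simp only [List.all_eq_true]
  constructor
  · intro h k hkp hks
    have hkm : k < (p.toList.take m).length := by
      simp only [List.length_take]; omega
    have hm2 : ((k : Int), (p.toList.take m)[k]) ∈ PySem.List.enumerate (p.toList.take m) 0 := by
      rw [PySem.List.mem_enumerate_iff]
      exact ⟨k, hkm, by simp⟩
    have := h _ hm2
    rw [List.getElem_take] at this
    simp only [PySem.Str.len_eq, bne, Bool.not_not, Bool.or_eq_true, beq_iff_eq,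
      decide_eq_true_eq] at this
    rcases this with h1 | h1 | h1
    · exact Or.inl h1
    · omega
    · right
      rw [PySem.List.pyGetD_eq_getElem s.toList ' ' (by omega) (by exact_mod_cast hks)] at h1
      simp only [Int.toNat_natCast] at h1
      exact h1.symm
  · intro h ip hip
    rw [PySem.List.mem_enumerate_iff] at hip
    obtain ⟨k, hkm, rfl⟩ := hip
    rw [List.getElem_take]
    have hkp : k < p.toList.length := by
      have := hkm; simp only [List.length_take] at this; omega
    simp only [PySem.Str.len_eq, bne, Bool.not_not, Bool.or_eq_true, beq_iff_eq,
      decide_eq_true_eq, zero_add]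
    by_cases hks : k < s.toList.length
    · rcases h k hkp hks with h1 | h1
      · exact Or.inl h1
      · right; right
        rw [PySem.List.pyGetD_eq_getElem s.toList ' ' (by omega) (by exact_mod_cast hks)]
        simp only [Int.toNat_natCast]
        exact h1.symm
    · right; left; omega

-- The pattern-major foldl of filtering passes is one filter by the conjunction of the passes.
lemma foldl_filter {α β : Type} (l : List α) (xs : List β) (c : α → Bool) (f : α → β → Bool) :
    l.foldl (fun cand x => if c x then cand.filter (f x) else cand) xs
      = xs.filter (fun s => l.all (fun x => !(c x) || f x s)) := by
  induction l generalizing xs with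
  | nil => simp
  | cons a l ih =>
    rw [List.foldl_cons]
    by_cases ha : c a = true
    · rw [if_pos ha, ih, List.filter_filter]
      apply List.filter_congr
      intro s _
      simp [ha, Bool.and_comm]
    · have ha' : c a = false := by simpa using ha
      rw [if_neg (by simp [ha']), ih]
      apply List.filter_congr
      intro s _
      simp [ha']

-- The running maximum only grows.
lemma foldl_max_init_le {α : Type} (l : List α) (f : α → Int) (init : Int) :
    init ≤ l.foldl (fun m t => max m (f t)) init := by
  induction l generalizing init with
  | nil => simp
  | cons a l ih => exact le_trans (le_max_left _ _) (ih (max init (f a)))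

-- Every element's length is at most B's cut-off.
lemma len_le_foldl_max {α : Type} (l : List α) (f : α → Int) (s : α) (hs : s ∈ l) (init : Int) :
    f s ≤ l.foldl (fun m t => max m (f t)) init := by
  induction l generalizing init with
  | nil => cases hs
  | cons a l ih =>
    rcases List.mem_cons.mp hs with rfl | hs'
    · exact le_trans (le_max_right _ _) (foldl_max_init_le l f _)
    · exact ih hs' _

-- ===== VERDICT (by name: the statement is the Claim_ definition above) =====
theorem find_matching_strings_spec : Claim_equal_find_matching_strings := by
  intro pattern strings _
  unfold Spec_find_matching_strings
  simp only [find_matching_strings, find_matching_strings_alt]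
  rw [foldl_filter]
  rw [show (fun (matching_strings : List String) (s : String) =>
        if (PySem.List.pyRange 0 (PySem.Str.len s) 1).all
             (fun i => PySem.List.pyGetD s.toList i ' '
                         == ((PySem.List.enumerate pattern.toList 0).foldl
                               (fun d ic => if ic.2 ≠ '*' then d.insert ic.1 ic.2 else d)
                               PySem.Dict.empty).getD i (PySem.List.pyGetD s.toList i ' '))
        then matching_strings ++ [s] else matching_strings)
      = (fun acc s => if ((fun s : String =>
            (PySem.List.pyRange 0 (PySem.Str.len s) 1).all
              (fun i => PySem.List.pyGetD s.toList i ' '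
                          == ((PySem.List.enumerate pattern.toList 0).foldl
                                (fun d ic => if ic.2 ≠ '*' then d.insert ic.1 ic.2 else d)
                                PySem.Dict.empty).getD i (PySem.List.pyGetD s.toList i ' '))) s) = true
          then acc ++ [(id s : String)] else acc)
      from by funext acc s; simp]
  rw [PySem.List.foldl_append_if]
  simp only [List.map_id, List.nil_append]
  set limit : Int := strings.foldl (fun m s => max m (PySem.Str.len s)) 0 with hlimit
  have hlim0 : 0 ≤ limit := foldl_max_init_le strings _ 0
  have hcast : limit = ((limit.toNat : Nat) : Int) := by omega
  rw [hcast, PySem.List.slice_to_natCast]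
  apply List.filter_congr
  intro s hs
  have hle : s.toList.length ≤ limit.toNat := by
    have h1 : PySem.Str.len s ≤ limit := len_le_foldl_max strings _ s hs 0
    rw [PySem.Str.len_eq] at h1
    omega
  rw [Bool.eq_iff_iff]
  exact (checkA_iff pattern s).trans (checkB_iff pattern s limit.toNat hle).symm
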